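-- pv_equiv track=rewrite | github.com/Ayushbh6/Another-Coding-Agent | aca/tools/access.py | _contains_exact_path
-- ===== SOURCE A (Python) =====
-- def _contains_exact_path(text: str, path: str) -> bool:
--     if not text or not path:
--         return False
--     candidates = {
--         path,
--         f"`{path}`",
--         f'"{path}"',
--         f"'{path}'",
--         f"({path})",
--         f"[{path}]",
--     }
--     return any(candidate in text for candidate in candidates)
-- ===== SOURCE B (Python) =====
-- def _contains_exact_path(text: str, path: str) -> bool:
--     # Every delimiter-wrapped candidate contains `path` itself, so one substring
--     # check is equivalent to the six-way candidate scan.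
--     if not text or not path:
--         return False
--     return path in text
-- ===== Notes on version B (the rewrite author's own statement) =====
-- stated objective: simpler
-- what changed: B replaces the six-candidate set and any(...)-scan with a single `path in text` substring check, which is equivalent because the bare path is itself a candidate and every wrapped candidate contains it.
import Mathlib
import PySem

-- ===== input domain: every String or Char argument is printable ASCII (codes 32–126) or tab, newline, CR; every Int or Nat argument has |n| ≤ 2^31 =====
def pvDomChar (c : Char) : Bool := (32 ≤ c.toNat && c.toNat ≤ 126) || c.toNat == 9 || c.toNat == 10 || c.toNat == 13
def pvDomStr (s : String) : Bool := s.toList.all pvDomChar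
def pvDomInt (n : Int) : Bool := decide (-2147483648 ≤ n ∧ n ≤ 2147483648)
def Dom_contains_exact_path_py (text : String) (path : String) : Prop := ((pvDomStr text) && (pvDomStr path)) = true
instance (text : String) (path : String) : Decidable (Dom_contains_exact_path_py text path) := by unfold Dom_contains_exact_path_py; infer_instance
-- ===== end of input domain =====

-- B drops the six-candidate set: the bare path is a candidate and every wrapped
-- candidate contains it, so one substring check suffices (objective: simpler).

-- ===== PORT A =====
def contains_exact_path_py (text : String) (path : String) : Bool :=
  if text = "" || path = "" then false
  else
    let candidates : PySem.Set String := PySem.Set.ofList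
      [ path
      , "`" ++ path ++ "`"
      , "\"" ++ path ++ "\""
      , "'" ++ path ++ "'"
      , "(" ++ path ++ ")"
      , "[" ++ path ++ "]" ]
    candidates.any (fun candidate => PySem.Str.isIn candidate text)

-- ===== PORT B =====
def contains_exact_path_py_alt (text : String) (path : String) : Bool :=
  if text = "" || path = "" then false
  else PySem.Str.isIn path text

-- ===== PRECONDITION & SPEC =====
def Spec_contains_exact_path_py (text : String) (path : String) (out : Bool) : Prop := out = contains_exact_path_py_alt text path
instance (text : String) (path : String) (out : Bool) : Decidable (Spec_contains_exact_path_py text path out) := by unfold Spec_contains_exact_path_py; infer_instance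

-- ===== CLAIM (what is proved, stated in full; the proofs are below) =====
def Claim_equal_contains_exact_path_py : Prop := ∀ (text : String) (path : String), Dom_contains_exact_path_py text path → Spec_contains_exact_path_py text path (contains_exact_path_py text path)

-- ===== LEMMAS AND PROOFS =====

-- each candidate in A's list contains path as an infix
theorem path_infix_of_mem_candidates (path c : String)
    (hc : c ∈ [ path
              , "`" ++ path ++ "`"
              , "\"" ++ path ++ "\""
              , "'" ++ path ++ "'"
              , "(" ++ path ++ ")"
              , "[" ++ path ++ "]" ]) :
    path.toList <:+: c.toList := by
  simp only [List.mem_cons, List.not_mem_nil, or_false] at hc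
  rcases hc with rfl | rfl | rfl | rfl | rfl | rfl
  · exact List.infix_rfl
  all_goals
    simp only [String.toList_append]
    exact ⟨_, _, rfl⟩

theorem contains_exact_path_py_spec : Claim_equal_contains_exact_path_py := by
  intro text path _
  unfold Spec_contains_exact_path_py contains_exact_path_py contains_exact_path_py_alt
  by_cases hg : (text = "" || path = "") = true
  · simp [hg]
  · simp only [hg, if_neg, Bool.false_eq_true, not_false_eq_true]
    rcases h : PySem.Str.isIn path text with _ | _
    · -- path not in text: no candidate is in text
      rw [List.any_eq_false]
      intro c hcmem
      have hc : c ∈ [ path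
                    , "`" ++ path ++ "`"
                    , "\"" ++ path ++ "\""
                    , "'" ++ path ++ "'"
                    , "(" ++ path ++ ")"
                    , "[" ++ path ++ "]" ] := (PySem.Set.mem_ofList _ _).1 hcmem
      intro hcin
      have h1 : c.toList <:+: text.toList := (PySem.Str.isIn_iff_infix _ _).1 hcin
      have h2 := (path_infix_of_mem_candidates path c hc).trans h1
      rw [← PySem.Str.isIn_iff_infix] at h2
      rw [h] at h2
      exact Bool.false_ne_true h2
    · -- path in text: the bare candidate path witnesses `any`
      rw [List.any_eq_true]
      exact ⟨path, (PySem.Set.mem_ofList _ _).2 (by simp), h⟩
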